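-- pv_equiv track=rewrite | github.com/GeorgeBeshay/ProblemSolving | CF_Phase_2_1/Greedy/P102B_SumOfDigits.py | TheAmazingFunction
-- ===== SOURCE A (Python) =====
-- def TheAmazingFunction(N):
--     ans = 0
--     while len(str(N)) > 1:
--         temp = 0
--         for i in str(N):
--             temp += int(i)
--         N = temp
--         ans += 1
--     return ans
-- ===== SOURCE B (Python) =====
-- def TheAmazingFunction(N):
--     # count(N) = 0 for single-digit N, else 1 + count(digit_sum(N)); digit sum by arithmetic, no strings
--     if N < 10:
--         return 0
--     s = 0
--     m = N
--     while m > 0: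
--         s += m % 10
--         m //= 10
--     return 1 + TheAmazingFunction(s)
-- ===== Notes on version B (the rewrite author's own statement) =====
-- stated objective: alternative
-- what changed: B replaces A's str()-conversion while-loop (summing int(c) over the decimal string each pass) with a purely arithmetic recursion: digit sum via modulus and floor division, recurring count = one more than the count of the digit sum, bottoming out at single-digit inputs.
import Mathlib
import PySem

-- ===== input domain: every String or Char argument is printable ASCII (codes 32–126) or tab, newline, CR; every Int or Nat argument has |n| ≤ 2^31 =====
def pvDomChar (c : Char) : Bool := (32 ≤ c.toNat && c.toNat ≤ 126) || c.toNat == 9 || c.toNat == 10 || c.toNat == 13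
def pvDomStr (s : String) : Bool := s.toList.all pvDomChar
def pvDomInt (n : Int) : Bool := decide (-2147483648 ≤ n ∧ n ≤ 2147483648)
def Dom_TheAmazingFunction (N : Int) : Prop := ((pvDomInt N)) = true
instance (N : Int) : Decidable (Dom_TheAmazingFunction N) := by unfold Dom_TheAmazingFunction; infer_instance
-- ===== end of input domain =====

-- B counts digit-sum steps by arithmetic (% 10, // 10) recursion instead of A's str()-based while loop;
-- equivalence is proved on Pre_ (0 ≤ N, where A does not raise ValueError on the '-' character).


-- ===== PORT A =====
-- int(i) for a one-character string i; 0 where Python raises (only the '-' sign character, outside Pre_)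
def pvIntVal (c : Char) : Int := (PySem.Int.ofChars? [c]).getD 0

-- the inner 'temp = 0; for i in str(N): temp += int(i)' loop
def pvCharSum (cs : List Char) : Int := cs.foldl (fun t c => t + pvIntVal c) 0

-- the 'while len(str(N)) > 1' loop; the Nat argument is FUEL (a totality guard only:
-- each pass strictly shrinks 2*|N| + [N<0], so fuel 2*|N| + 1 is never exhausted — proved in pvMain below)
def pvLoopA : Nat → Int → Int → Int
  | 0, _, ans => ans
  | fuel + 1, N, ans =>
    if (PySem.Int.toChars N).length > 1 then
      pvLoopA fuel (pvCharSum (PySem.Int.toChars N)) (ans + 1)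
    else ans

def TheAmazingFunction (N : Int) : Int := pvLoopA (2 * N.natAbs + 1) N 0

-- ===== PORT B =====
-- 's = 0; m = N; while m > 0: s += m % 10; m //= 10'; fuel m.toNat suffices (m shrinks every pass)
def pvLoopB : Nat → Int → Int → Int
  | 0, _, s => s
  | fuel + 1, m, s =>
    if m > 0 then pvLoopB fuel (PySem.Int.floordiv m 10) (s + PySem.Int.mod m 10) else s

-- 'if N < 10: return 0; …; return 1 + TheAmazingFunction(s)'; fuel N.toNat bounds the recursion depth
def pvAltGo : Nat → Int → Int
  | 0, _ => 0
  | fuel + 1, N =>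
    if N < 10 then 0
    else 1 + pvAltGo fuel (pvLoopB N.toNat N 0)

def TheAmazingFunction_alt (N : Int) : Int := pvAltGo N.toNat N

-- ===== PRECONDITION & SPEC =====
-- Pre_ excludes exactly the inputs where A raises: on every negative N, str(N) starts with '-' and int('-') is a ValueError.
def Pre_TheAmazingFunction (N : Int) : Prop := 0 ≤ N
instance (N : Int) : Decidable (Pre_TheAmazingFunction N) := by unfold Pre_TheAmazingFunction; infer_instance
def pvWitness_TheAmazingFunction : Int := (199)

def Spec_TheAmazingFunction (N : Int) (out : Int) : Prop := out = TheAmazingFunction_alt N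
instance (N : Int) (out : Int) : Decidable (Spec_TheAmazingFunction N out) := by unfold Spec_TheAmazingFunction; infer_instance

-- ===== CLAIM (what is proved, stated in full; the proofs are below) =====
def Claim_equal_TheAmazingFunction : Prop := ∀ (N : Int), Dom_TheAmazingFunction N → Pre_TheAmazingFunction N → Spec_TheAmazingFunction N (TheAmazingFunction N)

-- ===== LEMMAS AND PROOFS =====

-- the mathematical digit sum (proof-side abstraction of both loops)
def pvDigitSumNat (n : Nat) : Nat :=
  if h : n = 0 then 0 else n % 10 + pvDigitSumNat (n / 10)
termination_by n
decreasing_by exact Nat.div_lt_self (Nat.pos_of_ne_zero h) (by norm_num)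

lemma pvDigitSumNat_zero : pvDigitSumNat 0 = 0 := by rw [pvDigitSumNat]; simp

lemma pvDigitSumNat_le (n : Nat) : pvDigitSumNat n ≤ n := by
  induction n using Nat.strong_induction_on with
  | _ n ih =>
    rw [pvDigitSumNat]
    split
    · omega
    · have h1 : pvDigitSumNat (n / 10) ≤ n / 10 :=
        ih (n / 10) (Nat.div_lt_self (by omega) (by norm_num))
      omega

lemma pvDigitSumNat_lt (n : Nat) (h : 10 ≤ n) : pvDigitSumNat n < n := by
  rw [pvDigitSumNat]
  have h1 : pvDigitSumNat (n / 10) ≤ n / 10 := pvDigitSumNat_le (n / 10)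
  split
  · omega
  · omega

lemma pvIntVal_digitChar (d : Nat) (h : d < 10) : pvIntVal (Nat.digitChar d) = (d : Int) := by
  interval_cases d <;> decide

lemma pvCore_sum : ∀ (f n : Nat) (ds : List Char), n < f →
    ((Nat.toDigitsCore 10 f n ds).map pvIntVal).sum
      = (pvDigitSumNat n : Int) + (ds.map pvIntVal).sum := by
  intro f
  induction f with
  | zero => intro n ds h; omega
  | succ f ih =>
    intro n ds h
    rw [Nat.toDigitsCore]
    have hd : pvIntVal (n % 10).digitChar = ((n % 10 : Nat) : Int) :=
      pvIntVal_digitChar _ (Nat.mod_lt _ (by norm_num))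
    by_cases h0 : n / 10 = 0
    · rw [if_pos h0]
      have hn : pvDigitSumNat n = n % 10 := by
        rw [pvDigitSumNat]
        split
        · omega
        · rw [h0, pvDigitSumNat_zero]; omega
      simp only [List.map_cons, List.sum_cons, hd, hn]
    · rw [if_neg h0]
      have hlt : n / 10 < f :=
        lt_of_lt_of_le (Nat.div_lt_self (by omega) (by norm_num)) (by omega)
      rw [ih (n / 10) _ hlt]
      have hn : pvDigitSumNat n = n % 10 + pvDigitSumNat (n / 10) := by
        rw [pvDigitSumNat]
        split
        · omega
        · rfl
      simp only [List.map_cons, List.sum_cons, hd, hn]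
      push_cast
      ring

-- number of decimal digits
def pvNumLen (n : Nat) : Nat :=
  if h : n < 10 then 1 else pvNumLen (n / 10) + 1
termination_by n
decreasing_by exact Nat.div_lt_self (by omega) (by norm_num)

lemma pvNumLen_pos (n : Nat) : 0 < pvNumLen n := by
  rw [pvNumLen]; split <;> omega

lemma pvNumLen_gt_one_iff (n : Nat) : 1 < pvNumLen n ↔ 10 ≤ n := by
  rw [pvNumLen]
  split
  · omega
  · have := pvNumLen_pos (n / 10)
    omega

lemma pvCore_len : ∀ (f n : Nat) (ds : List Char), n < f →
    (Nat.toDigitsCore 10 f n ds).length = pvNumLen n + ds.length := by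
  intro f
  induction f with
  | zero => intro n ds h; omega
  | succ f ih =>
    intro n ds h
    rw [Nat.toDigitsCore]
    by_cases h0 : n / 10 = 0
    · rw [if_pos h0]
      have hn : pvNumLen n = 1 := by rw [pvNumLen]; rw [dif_pos (by omega)]
      simp [hn]
      omega
    · rw [if_neg h0]
      have hlt : n / 10 < f :=
        lt_of_lt_of_le (Nat.div_lt_self (by omega) (by norm_num)) (by omega)
      rw [ih (n / 10) _ hlt]
      have hn : pvNumLen n = pvNumLen (n / 10) + 1 := by
        rw [pvNumLen]; rw [dif_neg (by omega)]
      simp [hn]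
      omega

lemma pvCharSum_eq_sum (cs : List Char) : pvCharSum cs = (cs.map pvIntVal).sum := by
  simpa using PySem.List.foldl_add cs pvIntVal 0

lemma pvCharSum_toChars (N : Int) :
    pvCharSum (PySem.Int.toChars N) = (pvDigitSumNat N.natAbs : Int) := by
  rw [PySem.Int.toChars]
  split
  · rw [pvCharSum_eq_sum, Nat.toDigits]
    simp only [List.map_cons, List.sum_cons]
    rw [pvCore_sum _ _ _ (Nat.lt_succ_self _)]
    have hm : pvIntVal '-' = 0 := by decide
    simp [hm]
  · rw [pvCharSum_eq_sum, Nat.toDigits, pvCore_sum _ _ _ (Nat.lt_succ_self _)]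
    have ht : N.toNat = N.natAbs := by omega
    simp [ht]

lemma pvToChars_len_gt_one (N : Int) :
    (PySem.Int.toChars N).length > 1 ↔ (N < 0 ∨ 10 ≤ N) := by
  rw [PySem.Int.toChars]
  split
  · rename_i hneg
    simp only [List.length_cons, Nat.toDigits, pvCore_len _ _ _ (Nat.lt_succ_self _)]
    have := pvNumLen_pos N.natAbs
    constructor
    · intro _; exact Or.inl hneg
    · intro _; omega
  · rename_i hneg
    rw [Nat.toDigits, pvCore_len _ _ _ (Nat.lt_succ_self _)]
    simp only [List.length_nil, Nat.add_zero]
    have h1 := pvNumLen_gt_one_iff N.toNat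
    constructor
    · intro h; right; have := h1.1 h; omega
    · intro h; exact h1.2 (by omega)

lemma pvLoopB_eq : ∀ (f : Nat) (m s : Int), m.toNat ≤ f →
    pvLoopB f m s = s + (pvDigitSumNat m.toNat : Int) := by
  intro f
  induction f with
  | zero =>
    intro m s h
    have hm : m.toNat = 0 := by omega
    rw [pvLoopB, hm, pvDigitSumNat_zero]
    simp
  | succ f ih =>
    intro m s h
    rw [pvLoopB]
    by_cases hm : m > 0
    · rw [if_pos hm]
      rw [PySem.Int.floordiv_eq_ediv_of_pos (by norm_num), PySem.Int.mod_eq_emod_of_pos (by norm_num)]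
      rw [ih (m / 10) _ (by omega)]
      have h1 : (m / 10).toNat = m.toNat / 10 := by omega
      have h2 : pvDigitSumNat m.toNat = m.toNat % 10 + pvDigitSumNat (m.toNat / 10) := by
        rw [pvDigitSumNat]
        split
        · omega
        · rfl
      rw [h1, h2]
      have h3 : m % 10 = ((m.toNat % 10 : Nat) : Int) := by omega
      rw [h3]
      push_cast
      ring
    · rw [if_neg hm]
      have hz : m.toNat = 0 := by omega
      rw [hz, pvDigitSumNat_zero]
      simp

-- the fuel of pvAltGo is irrelevant once it covers the value
lemma pvAltGo_fuel : ∀ (n f g : Nat), n ≤ f → n ≤ g → pvAltGo f (n : Int) = pvAltGo g (n : Int) := by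
  intro n
  induction n using Nat.strong_induction_on with
  | _ n ih =>
    intro f g hf hg
    by_cases h10 : (10 : Nat) ≤ n
    · obtain ⟨f', rfl⟩ : ∃ f', f = f' + 1 := ⟨f - 1, by omega⟩
      obtain ⟨g', rfl⟩ : ∃ g', g = g' + 1 := ⟨g - 1, by omega⟩
      rw [pvAltGo, pvAltGo]
      rw [if_neg (show ¬((n : Int) < 10) by exact_mod_cast not_lt.2 (by exact_mod_cast h10)),
          if_neg (show ¬((n : Int) < 10) by exact_mod_cast not_lt.2 (by exact_mod_cast h10))]
      rw [pvLoopB_eq _ _ _ (by simp)]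
      simp only [Int.toNat_natCast, zero_add]
      have hlt : pvDigitSumNat n < n := pvDigitSumNat_lt n h10
      rw [ih (pvDigitSumNat n) hlt f' g' (by omega) (by omega)]
    · cases f with
      | zero => cases g with
        | zero => rfl
        | succ g' => rw [pvAltGo, pvAltGo, if_pos (by exact_mod_cast (by omega : n < 10))]
      | succ f' => cases g with
        | zero => rw [pvAltGo, pvAltGo, if_pos (by exact_mod_cast (by omega : n < 10))]
        | succ g' =>
          rw [pvAltGo, pvAltGo, if_pos (by exact_mod_cast (by omega : n < 10)),
              if_pos (by exact_mod_cast (by omega : n < 10))]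

lemma pvAlt_small (n : Nat) (h : n < 10) : TheAmazingFunction_alt (n : Int) = 0 := by
  unfold TheAmazingFunction_alt
  simp only [Int.toNat_natCast]
  cases n with
  | zero => rfl
  | succ m => rw [pvAltGo, if_pos (by exact_mod_cast h)]

lemma pvAlt_step (n : Nat) (h : 10 ≤ n) :
    TheAmazingFunction_alt (n : Int) = 1 + TheAmazingFunction_alt ((pvDigitSumNat n : Nat) : Int) := by
  unfold TheAmazingFunction_alt
  simp only [Int.toNat_natCast]
  obtain ⟨f, rfl⟩ : ∃ f, n = f + 1 := ⟨n - 1, by omega⟩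
  rw [pvAltGo, if_neg (show ¬(((f + 1 : Nat) : Int) < 10) by exact_mod_cast not_lt.2 (by exact_mod_cast h))]
  rw [pvLoopB_eq _ _ _ (by simp)]
  simp only [Int.toNat_natCast, zero_add]
  have hlt : pvDigitSumNat (f + 1) < f + 1 := pvDigitSumNat_lt _ h
  rw [pvAltGo_fuel (pvDigitSumNat (f + 1)) f (pvDigitSumNat (f + 1)) (by omega) le_rfl]

lemma pvMain : ∀ (f : Nat) (n : Nat) (ans : Int), 2 * n < f →
    pvLoopA f (n : Int) ans = ans + TheAmazingFunction_alt (n : Int) := by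
  intro f
  induction f with
  | zero => intro n ans h; omega
  | succ f ih =>
    intro n ans h
    rw [pvLoopA]
    by_cases h10 : 10 ≤ n
    · rw [if_pos ((pvToChars_len_gt_one _).2 (Or.inr (by exact_mod_cast h10)))]
      rw [pvCharSum_toChars]
      simp only [Int.natAbs_natCast]
      have hlt : pvDigitSumNat n < n := pvDigitSumNat_lt n h10
      rw [ih (pvDigitSumNat n) (ans + 1) (by omega)]
      rw [pvAlt_step n h10]
      ring
    · rw [if_neg (by rw [pvToChars_len_gt_one]; omega)]
      rw [pvAlt_small n (by omega)]
      simp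

-- ===== VERDICT (by name: the statement is the Claim_ definition above) =====
theorem TheAmazingFunction_spec : Claim_equal_TheAmazingFunction := by
  intro N _ hpre
  unfold Pre_TheAmazingFunction at hpre
  unfold Spec_TheAmazingFunction TheAmazingFunction
  obtain ⟨n, rfl⟩ : ∃ m : Nat, N = (m : Int) := ⟨N.toNat, by omega⟩
  simp only [Int.natAbs_natCast]
  rw [pvMain (2 * n + 1) n 0 (by omega)]
  simp
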